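-- pv_equiv track=rewrite | github.com/sayashm/Programming2024-2025 | Reeks_08/blokkentoren.py | fragments
-- ===== SOURCE A (Python) =====
-- def letters(name: str) -> list:
--     '''
--     >>> letters('ALUMINIUM')
--     ['A', 'I', 'L', 'M', 'N', 'U']
--     '''
--     from string import punctuation
--
--     punc = punctuation + ' '
--     return sorted([i for i in list(set(name.upper())) if (i not in punc and not i.isdigit())])
--
-- def fragments(name:str) -> list:
--     '''
--     >>> fragments('ALUMINIUM')
--     ['A', 'BCDEFGHI', 'JKL', 'M', 'N', 'OPQRSTU', 'VWXYZ']
--     '''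
--     from string import ascii_uppercase as upper
--
--     letter = letters(name)
--     pos = [upper.find(i)+1 for i in letter]
--     pos.append(len(upper)) if letter[-1] != upper[-1] else pos
--     pos.insert(0, 0)
--     steps =[(pos[i], pos[i + 1]) for i in range(len(pos) - 1)]
--     return [upper[i:j] for i, j in steps]
-- ===== SOURCE B (Python) =====
-- def fragments(name: str) -> list:
--     from string import ascii_uppercase as upper
--
--     letter = sorted({c for c in name.upper() if c in upper})
--
--     def go(start, ls):
--         if not ls:
--             return [upper[start:]] if start < len(upper) else []
--         end = upper.index(ls[0]) + 1
--         return [upper[start:end]] + go(end, ls[1:])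
--
--     return go(0, letter)
-- ===== Notes on version B (the rewrite author's own statement) =====
-- stated objective: alternative
-- what changed: A builds a positions list, mutates it (conditional append, insert of 0), forms adjacent index pairs and slices the alphabet per pair; B recurses once over the sorted letter list carrying the next slice start, emitting each fragment directly.
-- intended difference: On names containing a tab, newline or CR, A's letters filter keeps the control character, whose alphabet position upper.find(c)+1 = 0 makes A emit an accidental empty first fragment (A('\t') = ['', 'ABCDEFGHIJKLMNOPQRSTUVWXYZ']); B ignores non-alphabet characters and returns only the real fragments (['ABCDEFGHIJKLMNOPQRSTUVWXYZ']), which is the intended value. — e.g. on fragments("\t"): A returns ["", "ABCDEFGHIJKLMNOPQRSTUVWXYZ"], B returns ["ABCDEFGHIJKLMNOPQRSTUVWXYZ"]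
import Mathlib
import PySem

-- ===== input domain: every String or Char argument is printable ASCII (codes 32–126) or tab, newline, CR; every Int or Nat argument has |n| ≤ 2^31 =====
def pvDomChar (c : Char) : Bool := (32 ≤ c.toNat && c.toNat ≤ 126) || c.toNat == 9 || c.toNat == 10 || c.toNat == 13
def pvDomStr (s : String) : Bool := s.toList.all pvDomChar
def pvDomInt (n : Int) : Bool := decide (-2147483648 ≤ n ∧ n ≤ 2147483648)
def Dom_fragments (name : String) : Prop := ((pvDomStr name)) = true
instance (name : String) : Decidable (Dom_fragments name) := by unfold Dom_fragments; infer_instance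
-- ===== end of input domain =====

-- B replaces A's positions→pairs→slices pipeline by a single recursion over the sorted
-- letter list that carries the next slice start (objective: alternative, same cost).

-- ===== PORT A =====
-- string.ascii_uppercase
def pvUpper : List Char :=
  ['A','B','C','D','E','F','G','H','I','J','K','L','M',
   'N','O','P','Q','R','S','T','U','V','W','X','Y','Z']
-- string.punctuation + ' '
def pvPunc : List Char :=
  ['!','"','#','$','%','&','\'','(',')','*','+',',','-','.','/',':',';','<','=','>','?','@',
   '[','\\',']','^','_','`','{','|','}','~',' ']

-- helper 'letters' of A; Python's 1-char strings are Chars, sorted(list(set(...))) is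
-- sorted of the distinct elements (order of list(set(..)) is irrelevant after sorting)
def lettersA (name : String) : List Char :=
  PySem.List.sorted
    ((PySem.Set.ofList (PySem.Chars.upper name.toList) : List Char).filter
      (fun c => !(pvPunc.contains c) && !(PySem.Chars.isdigit c)))
    (fun c => c)

def fragments (name : String) : List String :=
  let letter := lettersA name
  let pos : List Int := letter.map (fun c => PySem.Chars.find pvUpper [c] + 1)
  match PySem.List.pyGet? letter (-1) with
  | none => []   -- Python raises IndexError on letter[-1] here: excluded by Pre_fragments
  | some lastc =>
    -- upper[-1] is 'Z' on the constant alphabet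
    let pos := if lastc ≠ 'Z' then pos ++ [(pvUpper.length : Int)] else pos
    let pos := PySem.List.insert pos 0 0
    let steps := (PySem.List.pyRange 0 ((pos.length : Int) - 1) 1).map
      (fun i => (PySem.List.pyGetD pos i 0, PySem.List.pyGetD pos (i + 1) 0))
    steps.map (fun ij => String.ofList (PySem.List.slice pvUpper (some ij.1) (some ij.2)))

-- ===== PORT B =====
-- go(start, ls) of Source B; upper.index(ls[0]) always succeeds (ls ⊆ upper), getD 0 unreachable
def goB (start : Int) : List Char → List String
  | [] => if start < (pvUpper.length : Int)
          then [String.ofList (PySem.List.slice pvUpper (some start) none)] else []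
  | c :: ls =>
    let e : Int := (((PySem.List.index? pvUpper c).getD 0 : Nat) : Int) + 1
    String.ofList (PySem.List.slice pvUpper (some start) (some e)) :: goB e ls

def fragments_alt (name : String) : List String :=
  goB 0 (PySem.List.sorted
    (PySem.Set.ofList ((PySem.Chars.upper name.toList).filter (fun c => pvUpper.contains c)))
    (fun c => c))

-- ===== PRECONDITION & SPEC =====
-- A raises IndexError (letter[-1] on an empty letter list) exactly when every character of
-- of name is a digit, punctuation or space, so letters(name) is empty; Pre_ excludes
-- exactly those crashing inputs (the condition below is letters' own per-character filter).
def Pre_fragments (name : String) : Prop :=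
  name.toList.any (fun c =>
    !(pvPunc.contains (PySem.Chars.upperChar c)) &&
    !(PySem.Chars.isdigit (PySem.Chars.upperChar c))) = true
instance (name : String) : Decidable (Pre_fragments name) := by unfold Pre_fragments; infer_instance
def pvWitness_fragments : String := "ALUMINIUM"

def pvCtl (c : Char) : Bool := c == '\t' || c == '\n' || c == '\r'

-- On names containing a tab, newline or CR, A's letters filter keeps the control character,
-- whose alphabet position upper.find(c)+1 = 0 makes A emit an accidental empty first fragment;
-- B ignores non-alphabet characters and returns only the real alphabet fragments, which is
-- the intended value.
def D_fragments (name : String) : Prop := name.toList.any pvCtl = true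
instance (name : String) : Decidable (D_fragments name) := by unfold D_fragments; infer_instance

def Spec_fragments (name : String) (out : List String) : Prop :=
  ¬ D_fragments name → out = fragments_alt name
instance (name : String) (out : List String) : Decidable (Spec_fragments name out) := by
  unfold Spec_fragments; infer_instance

def pvDiffWitness_fragments : String := "\t"
def pvDiffWitnessOut_fragments : (List String) × (List String) :=
  (["", "ABCDEFGHIJKLMNOPQRSTUVWXYZ"], ["ABCDEFGHIJKLMNOPQRSTUVWXYZ"])

-- ===== CLAIM (what is proved, stated in full; the proofs are below) =====
def Claim_unchanged_fragments : Prop :=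
  ∀ (name : String), Dom_fragments name → Pre_fragments name →
    Spec_fragments name (fragments name)
def Claim_changed_fragments : Prop :=
  Dom_fragments (pvDiffWitness_fragments) ∧ Pre_fragments (pvDiffWitness_fragments) ∧
  D_fragments (pvDiffWitness_fragments) ∧
  fragments (pvDiffWitness_fragments) = pvDiffWitnessOut_fragments.1 ∧
  fragments_alt (pvDiffWitness_fragments) = pvDiffWitnessOut_fragments.2 ∧
  pvDiffWitnessOut_fragments.1 ≠ pvDiffWitnessOut_fragments.2
def Claim_exact_fragments : Prop :=
  ∀ (name : String), Dom_fragments name → Pre_fragments name → D_fragments name →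
    fragments name ≠ fragments_alt name
-- ===== LEMMAS AND PROOFS =====

-- A's position value for a letter, and B's letter list
def pvF (c : Char) : Int := PySem.Chars.find pvUpper [c] + 1
def pvLB (name : String) : List Char :=
  PySem.List.sorted
    (PySem.Set.ofList ((PySem.Chars.upper name.toList).filter (fun c => pvUpper.contains c)))
    (fun c => c)
def pvSlice (i j : Int) : String := String.ofList (PySem.List.slice pvUpper (some i) (some j))
def pvPairs (s : Int) (ps : List Int) : List String :=
  ((s :: ps).zip ps).map (fun ij => pvSlice ij.1 ij.2)

lemma pv_e_eq (c : Char) (hc : c ∈ pvUpper) :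
    (((PySem.List.index? pvUpper c).getD 0 : Nat) : Int) + 1 = pvF c := by
  fin_cases hc <;> decide

lemma pv_slice_full (c : Char) (hc : c ∈ pvUpper) :
    String.ofList (PySem.List.slice pvUpper (some (pvF c)) none) = pvSlice (pvF c) 26 := by
  fin_cases hc <;> decide

lemma pv_f_facts (c : Char) (hc : c ∈ pvUpper) :
    pvF c ≤ 26 ∧ (pvF c = 26 ↔ c = 'Z') := by
  fin_cases hc <;> exact ⟨by decide, by decide⟩

lemma pv_zip_tail (l : List Int) :
    (List.range (l.length - 1)).map (fun k => (l.getD k 0, l.getD (k+1) 0)) = l.zip l.tail := by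
  induction l with
  | nil => simp
  | cons a l ih =>
    cases l with
    | nil => simp
    | cons b t =>
      have h := ih
      simp only [List.length_cons, Nat.add_sub_cancel] at h ⊢
      rw [List.range_succ_eq_map]
      simp only [List.map_cons, List.map_map]
      simp only [List.zip_cons_cons, List.tail_cons] at h ⊢
      refine congrArg (List.cons _) ?_
      rw [← h]
      rfl

lemma pv_steps (l : List Int) :
    (PySem.List.pyRange 0 ((l.length : Int) - 1) 1).map
      (fun i => (PySem.List.pyGetD l i 0, PySem.List.pyGetD l (i + 1) 0)) = l.zip l.tail := by
  cases l with
  | nil => rfl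
  | cons a t =>
    have hlen : ((a :: t).length : Int) - 1 = ((t.length : Nat) : Int) := by
      push_cast [List.length_cons]; ring
    rw [hlen, PySem.List.pyRange_zero_natCast, List.map_map]
    rw [← pv_zip_tail (a :: t)]
    simp only [List.length_cons, Nat.add_sub_cancel]
    refine List.map_congr_left ?_
    intro k _
    rw [Function.comp_apply, show ((k : Int) + 1) = ((k + 1 : Nat) : Int) by push_cast; ring]
    rw [PySem.List.pyGetD_natCast, PySem.List.pyGetD_natCast]

lemma goB_nil (s : Int) : goB s [] =
    (if s < (pvUpper.length : Int)
     then [String.ofList (PySem.List.slice pvUpper (some s) none)] else []) := rfl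

lemma goB_cons (s : Int) (c : Char) (ls : List Char) : goB s (c :: ls) =
    String.ofList (PySem.List.slice pvUpper (some s)
        (some ((((PySem.List.index? pvUpper c).getD 0 : Nat) : Int) + 1)))
      :: goB ((((PySem.List.index? pvUpper c).getD 0 : Nat) : Int) + 1) ls := rfl

lemma pv_main (L : List Char) : ∀ (c : Char) (s : Int), (∀ x ∈ c :: L, x ∈ pvUpper) →
    pvPairs s (if (c :: L).getLastD 'A' ≠ 'Z'
               then (c :: L).map pvF ++ [(26 : Int)] else (c :: L).map pvF)
      = goB s (c :: L) := by
  induction L with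
  | nil =>
    intro c s hc
    have hcu : c ∈ pvUpper := hc c (by simp)
    obtain ⟨hle, hiff⟩ := pv_f_facts c hcu
    rw [goB_cons, pv_e_eq c hcu, goB_nil]
    by_cases hz : c = 'Z'
    · subst hz
      rw [if_neg (by decide : ¬ ((([('Z' : Char)] : List Char).getLastD 'A') ≠ 'Z'))]
      rw [if_neg (show ¬ (pvF 'Z' < (pvUpper.length : Int)) by decide)]
      simp [pvPairs, pvSlice]
    · have hne : (([c] : List Char).getLastD 'A' ≠ 'Z') := hz
      rw [if_pos hne]
      have hlt : pvF c < 26 := lt_of_le_of_ne hle (fun h => hz (hiff.mp h))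
      rw [if_pos (show pvF c < (pvUpper.length : Int) from hlt)]
      rw [pv_slice_full c hcu]
      simp [pvPairs, pvSlice]
  | cons c' L ih =>
    intro c s hc
    have hcu : c ∈ pvUpper := hc c (by simp)
    have hgl : ((c :: c' :: L).getLastD 'A') = ((c' :: L).getLastD 'A') := by
      simp
    rw [hgl]
    have hsplit : (if (c' :: L).getLastD 'A' ≠ 'Z'
        then (c :: c' :: L).map pvF ++ [(26 : Int)] else (c :: c' :: L).map pvF)
        = pvF c :: (if (c' :: L).getLastD 'A' ≠ 'Z'
        then (c' :: L).map pvF ++ [(26 : Int)] else (c' :: L).map pvF) := by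
      split_ifs <;> simp
    rw [hsplit]
    have hstep : ∀ ps : List Int,
        pvPairs s (pvF c :: ps) = pvSlice s (pvF c) :: pvPairs (pvF c) ps := fun ps => rfl
    rw [hstep, ih c' (pvF c) (fun x hx => hc x (by simp at hx ⊢; tauto)),
      goB_cons s c, pv_e_eq c hcu]
    rfl

-- per-character agreement of the two filters on printable non-control characters
lemma pv_char_range : ∀ k ∈ List.range 95,
    ((!(pvPunc.contains (PySem.Chars.upperChar (Char.ofNat (32 + k)))) &&
      !(PySem.Chars.isdigit (PySem.Chars.upperChar (Char.ofNat (32 + k)))))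
       = pvUpper.contains (PySem.Chars.upperChar (Char.ofNat (32 + k)))) := by
  decide

lemma pv_toNat_inj (a b : Char) (h : a.toNat = b.toNat) : a = b := by
  apply Char.ext; apply UInt32.toNat_inj.mp; exact h

lemma pv_dom_char (d : Char) (hd : pvDomChar d = true) (hc : pvCtl d = false)
    (P : Char → Prop)
    (h : ∀ k ∈ List.range 95, P (Char.ofNat (32 + k))) : P d := by
  have h1 : 32 ≤ d.toNat ∧ d.toNat ≤ 126 := by
    simp only [pvDomChar, Bool.or_eq_true, Bool.and_eq_true, decide_eq_true_eq,
      beq_iff_eq] at hd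
    simp only [pvCtl, Bool.or_eq_false_iff, beq_eq_false_iff_ne, ne_eq] at hc
    obtain ⟨⟨h9, h10⟩, h13⟩ := hc
    rcases hd with ((h | h) | h) | h
    · exact h
    · exact absurd (pv_toNat_inj d '\t' (by rw [h]; decide)) h9
    · exact absurd (pv_toNat_inj d '\n' (by rw [h]; decide)) h10
    · exact absurd (pv_toNat_inj d '\r' (by rw [h]; decide)) h13
  have hk := h (d.toNat - 32) (by simp only [List.mem_range]; omega)
  have h2 : 32 + (d.toNat - 32) = d.toNat := by omega
  rw [h2, Char.ofNat_toNat] at hk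
  exact hk

lemma pv_dom_chars (name : String) (hdom : Dom_fragments name) :
    ∀ d ∈ name.toList, pvDomChar d = true := by
  unfold Dom_fragments pvDomStr at hdom
  simpa [List.all_eq_true] using hdom

lemma pv_nctl_chars (name : String) (hnd : name.toList.any pvCtl = false) :
    ∀ d ∈ name.toList, pvCtl d = false := by
  intro d hd
  by_contra h
  have : name.toList.any pvCtl = true :=
    List.any_eq_true.mpr ⟨d, hd, by simpa using h⟩
  rw [this] at hnd; cases hnd

lemma pv_filters_agree (name : String) (hdom : Dom_fragments name)
    (hnd : name.toList.any pvCtl = false) :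
    ∀ d ∈ name.toList,
      (!(pvPunc.contains (PySem.Chars.upperChar d)) &&
       !(PySem.Chars.isdigit (PySem.Chars.upperChar d)))
        = pvUpper.contains (PySem.Chars.upperChar d) := by
  intro d hd
  exact pv_dom_char d (pv_dom_chars name hdom d hd) (pv_nctl_chars name hnd d hd)
    (fun x => (!(pvPunc.contains (PySem.Chars.upperChar x)) &&
      !(PySem.Chars.isdigit (PySem.Chars.upperChar x)))
        = pvUpper.contains (PySem.Chars.upperChar x))
    pv_char_range

lemma pv_letters_eq (name : String) (hdom : Dom_fragments name)
    (hnd : name.toList.any pvCtl = false) : lettersA name = pvLB name := by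
  unfold lettersA pvLB
  have hagree : ∀ c ∈ (PySem.Set.ofList (PySem.Chars.upper name.toList) : List Char),
      (!(pvPunc.contains c) && !(PySem.Chars.isdigit c)) = pvUpper.contains c := by
    intro c hc
    rw [PySem.Set.mem_ofList] at hc
    unfold PySem.Chars.upper at hc
    obtain ⟨d, hd, rfl⟩ := List.mem_map.mp hc
    exact pv_filters_agree name hdom hnd d hd
  rw [List.filter_congr hagree]
  refine PySem.List.sorted_eq_sorted_of_perm _ _ _ (fun a b h => h) ?_
  refine (List.perm_ext_iff_of_nodup ((PySem.Set.nodup_ofList _).filter _)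
    (PySem.Set.nodup_ofList _)).mpr ?_
  intro a
  simp only [List.mem_filter, PySem.Set.mem_ofList]

lemma pv_LB_mem_upper (name : String) (c : Char) (hc : c ∈ pvLB name) : c ∈ pvUpper := by
  simp only [pvLB, PySem.List.mem_sorted, PySem.Set.mem_ofList, List.mem_filter] at hc
  simpa using hc.2

lemma pv_LB_ne_nil (name : String) (hdom : Dom_fragments name)
    (hpre : Pre_fragments name) (hnd : name.toList.any pvCtl = false) : pvLB name ≠ [] := by
  intro h
  obtain ⟨d, hd, hk⟩ := List.any_eq_true.mp hpre
  have hu : pvUpper.contains (PySem.Chars.upperChar d) = true := by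
    rw [← pv_filters_agree name hdom hnd d hd]; exact hk
  have hmem : PySem.Chars.upperChar d ∈ pvLB name := by
    unfold pvLB
    rw [PySem.List.mem_sorted, PySem.Set.mem_ofList, List.mem_filter]
    refine ⟨?_, hu⟩
    unfold PySem.Chars.upper
    exact List.mem_map_of_mem hd
  rw [h] at hmem
  cases hmem

lemma pv_insert_zero (l : List Int) (x : Int) : PySem.List.insert l 0 x = x :: l := by
  simp [PySem.List.insert, PySem.List.sliceIndices]

lemma pv_frag_shape (name : String) (c : Char) (L : List Char)
    (hA : lettersA name = c :: L) :
    fragments name = pvPairs 0 (if (c :: L).getLastD 'A' ≠ 'Z'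
      then (c :: L).map pvF ++ [(26 : Int)] else (c :: L).map pvF) := by
  have hgl : (c :: L).getLast? = some ((c :: L).getLastD 'A') := by
    rw [List.getLastD_eq_getLast?]
    cases hx : (c :: L).getLast? with
    | none => simp at hx
    | some z => rfl
  have hlen : ((pvUpper.length : Nat) : Int) = (26 : Int) := by decide
  unfold fragments
  rw [hA]
  simp only [PySem.List.pyGet?_neg_one, hgl, pv_insert_zero, pv_steps, List.tail_cons, hlen]
  rfl

lemma pv_frag_eq (name : String) (hdom : Dom_fragments name)
    (hpre : Pre_fragments name) (hnd : name.toList.any pvCtl = false) :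
    fragments name = fragments_alt name := by
  have hL := pv_letters_eq name hdom hnd
  have hne := pv_LB_ne_nil name hdom hpre hnd
  obtain ⟨c, L, hcl⟩ : ∃ c L, pvLB name = c :: L := by
    cases hLB : pvLB name with
    | nil => exact absurd hLB hne
    | cons c L => exact ⟨c, L, rfl⟩
  have hmemU : ∀ x ∈ c :: L, x ∈ pvUpper := fun x hx =>
    pv_LB_mem_upper name x (hcl ▸ hx)
  have hA : lettersA name = c :: L := hL.trans hcl
  have halt : fragments_alt name = goB 0 (c :: L) := by
    unfold fragments_alt
    rw [show (PySem.List.sorted (PySem.Set.ofList ((PySem.Chars.upper name.toList).filter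
      (fun c => pvUpper.contains c))) (fun c => c)) = pvLB name from rfl, hcl]
  rw [halt, ← pv_main L c 0 hmemU, pv_frag_shape name c L hA]

lemma pv_upper_ge (x : Char) (hx : x ∈ pvUpper) : 65 ≤ x.toNat := by
  fin_cases hx <;> decide

lemma pv_ctl_le (d : Char) (hd : pvCtl d = true) : d.toNat ≤ 13 := by
  simp only [pvCtl, Bool.or_eq_true, beq_iff_eq] at hd
  rcases hd with (rfl | rfl) | rfl <;> decide

lemma pv_ctl_keep (d : Char) (hd : pvCtl d = true) :
    PySem.Chars.upperChar d = d ∧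
      (!(pvPunc.contains d) && !(PySem.Chars.isdigit d)) = true := by
  simp only [pvCtl, Bool.or_eq_true, beq_iff_eq] at hd
  rcases hd with (rfl | rfl) | rfl <;> exact ⟨by decide, by decide⟩

lemma pv_low_f (x : Char) (hx : x.toNat ≤ 13) : pvF x = 0 := by
  have hnm : x ∉ pvUpper := fun hm => by have := pv_upper_ge x hm; omega
  unfold pvF
  have hfind : PySem.Chars.find pvUpper [x] = -1 := by
    rw [PySem.Chars.find_eq_neg_one_iff]
    intro hin
    exact hnm (hin.subset (by simp))
  rw [hfind]; ring

lemma pv_tight_A (name : String) (hD : D_fragments name) :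
    ∃ t, fragments name = "" :: t := by
  obtain ⟨d, hd, hctl⟩ := List.any_eq_true.mp hD
  obtain ⟨hucd, hkeepd⟩ := pv_ctl_keep d hctl
  have hdmem : d ∈ ((PySem.Set.ofList (PySem.Chars.upper name.toList) : List Char).filter
      (fun c => !(pvPunc.contains c) && !(PySem.Chars.isdigit c))) := by
    rw [List.mem_filter, PySem.Set.mem_ofList]
    refine ⟨?_, hkeepd⟩
    unfold PySem.Chars.upper
    exact hucd ▸ List.mem_map_of_mem hd
  cases hA : lettersA name with
  | nil =>
    exfalso
    have hmem : d ∈ lettersA name := by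
      unfold lettersA; rw [PySem.List.mem_sorted]; exact hdmem
    rw [hA] at hmem; cases hmem
  | cons h0 R =>
    have hle : h0 ≤ d := by
      have h' : PySem.List.sorted ((PySem.Set.ofList (PySem.Chars.upper name.toList) :
          List Char).filter (fun c => !(pvPunc.contains c) && !(PySem.Chars.isdigit c)))
          (fun c => c) = h0 :: R := hA
      exact PySem.List.key_head_sorted_le _ _ h' d hdmem
    have h0n : h0.toNat ≤ 13 :=
      le_trans (Fin.mk_le_mk.mp hle) (pv_ctl_le d hctl)
    have hf0 : pvF h0 = 0 := pv_low_f h0 h0n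
    rw [pv_frag_shape name h0 R hA]
    have hkey : ∀ qs : List Int, pvPairs 0 ((0 : Int) :: qs) = "" :: pvPairs 0 qs :=
      fun _ => rfl
    split_ifs with hz
    · exact ⟨_, by rw [List.map_cons, hf0, List.cons_append]; exact hkey _⟩
    · exact ⟨_, by rw [List.map_cons, hf0]; exact hkey _⟩

lemma pv_tight_B (name : String) :
    ∃ h t, fragments_alt name = h :: t ∧ h ≠ "" := by
  unfold fragments_alt
  cases hl : PySem.List.sorted (PySem.Set.ofList ((PySem.Chars.upper name.toList).filter
      (fun c => pvUpper.contains c))) (fun c => c) with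
  | nil => exact ⟨_, _, rfl, by decide⟩
  | cons c ls =>
    refine ⟨_, _, goB_cons 0 c ls, ?_⟩
    intro habs
    have h1 := congrArg String.toList habs
    rw [String.toList_ofList] at h1
    rw [PySem.List.slice_zero_start,
      show ((((PySem.List.index? pvUpper c).getD 0 : Nat) : Int) + 1)
        = ((((PySem.List.index? pvUpper c).getD 0 + 1 : Nat)) : Int) by push_cast; ring,
      PySem.List.slice_to_natCast] at h1
    rw [show pvUpper = 'A' :: pvUpper.tail from rfl, List.take_succ_cons] at h1
    cases h1

-- ===== VERDICT (by name: the statement is the Claim_ definition above) =====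
theorem fragments_spec : Claim_unchanged_fragments := by
  intro name hdom hpre hD
  have hnd : name.toList.any pvCtl = false := by
    unfold D_fragments at hD
    exact Bool.not_eq_true _ ▸ (by simpa using hD)
  exact pv_frag_eq name hdom hpre hnd

theorem fragments_changed : Claim_changed_fragments := by
  unfold Claim_changed_fragments; decide

theorem fragments_tight : Claim_exact_fragments := by
  intro name hdom hpre hD
  obtain ⟨t, hA⟩ := pv_tight_A name hD
  obtain ⟨h, t', hB, hne⟩ := pv_tight_B name
  rw [hA, hB]
  intro he
  exact hne ((List.cons_eq_cons.mp he).1).symm
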